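-- pv_equiv track=rewrite | github.com/dnyaneshwar-Patil1999/Storyboard-backend_test | core/preprocessing.py | break_long_words
-- ===== SOURCE A (Python) =====
-- def break_long_words(text: str, max_len: int) -> str:
--     if not text: return ""
--     words = text.split()
--     processed = []
--     for word in words:
--         if len(word) > max_len:
--             for i in range(0, len(word), max_len):
--                 processed.append(word[i:i+max_len])
--         else:
--             processed.append(word)
--     return " ".join(processed)
-- ===== SOURCE B (Python) =====
-- def break_long_words(text: str, max_len: int) -> str:
--     # Single character-level pass: no split(), no slicing. A chunk counter
--     # tracks how many characters of the current chunk are emitted; whitespace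
--     # resets it, and a full chunk (or a new word) opens with a separating space.
--     out = []
--     count = None  # None: between words; otherwise chars emitted in current chunk
--     for ch in text:
--         if ch.isspace():
--             count = None
--         else:
--             if count is None or count == max_len:
--                 if out:
--                     out.append(' ')
--                 count = 0
--             out.append(ch)
--             count += 1
--     return ''.join(out)
-- ===== Notes on version B (the rewrite author's own statement) =====
-- stated objective: alternative
-- what changed: A's three-stage pipeline (split() into words, per-word length branch with an index-stride slicing loop, final join) is replaced by a single character-level automaton: one pass over the text with a chunk counter that whitespace resets, a full chunk or a word start emitting the separating space.
-- intended difference: On a negative max_len with at least one word A returns '' (its chunking range is empty, silently deleting every word) while B returns the words joined by single spaces, unbroken - the intended value: a nonsense chunk size should not erase the text. — e.g. on break_long_words("ab", -1): A returns "", B returns "ab"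
import Mathlib
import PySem

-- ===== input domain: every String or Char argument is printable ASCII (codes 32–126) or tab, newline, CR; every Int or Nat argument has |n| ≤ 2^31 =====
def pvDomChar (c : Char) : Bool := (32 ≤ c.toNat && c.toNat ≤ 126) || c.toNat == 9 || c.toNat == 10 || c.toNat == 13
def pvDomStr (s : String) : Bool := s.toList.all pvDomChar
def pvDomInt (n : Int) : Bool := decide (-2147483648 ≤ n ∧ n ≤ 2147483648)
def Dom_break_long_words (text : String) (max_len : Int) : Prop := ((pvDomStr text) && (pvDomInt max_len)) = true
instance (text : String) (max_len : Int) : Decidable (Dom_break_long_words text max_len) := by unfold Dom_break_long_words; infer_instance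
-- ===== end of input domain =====

-- B replaces A's split/branch/slice pipeline by a single character-level pass
-- (a chunk counter that whitespace resets): a different algorithm of the same cost.

-- ===== PORT A =====
def break_long_words (text : String) (max_len : Int) : String :=
  if text = "" then ""
  else
    let words := PySem.Str.split₀ text
    let processed : List String := words.foldl (fun acc word =>
      if PySem.Str.len word > max_len then
        (PySem.List.pyRange 0 (PySem.Str.len word) max_len).foldl
          (fun acc2 i => acc2 ++ [PySem.Str.slice word (some i) (some (i + max_len))]) acc
      else acc ++ [word]) []
    PySem.Str.join " " processed

-- ===== PORT B =====
-- one automaton step of Source B's loop body: out = st.1 (chars emitted), count = st.2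
def pvStepB (max_len : Int) (st : List Char × Option Int) (ch : Char) : List Char × Option Int :=
  if PySem.Chars.isspace ch then (st.1, none)
  else
    let st' := if st.2 = none ∨ st.2 = some max_len then
        ((if st.1 = [] then st.1 else st.1 ++ [' ']), some (0 : Int))
      else st
    (st'.1 ++ [ch], st'.2.map (· + 1))

def break_long_words_alt (text : String) (max_len : Int) : String :=
  String.ofList (text.toList.foldl (pvStepB max_len) ([], none)).1

-- ===== PRECONDITION & SPEC =====
-- Pre_ excludes exactly the inputs on which Python A raises (max_len = 0 while the
-- text contains at least one word: range(0, len(word), 0) is a ValueError).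
def Pre_break_long_words (text : String) (max_len : Int) : Prop :=
  max_len ≠ 0 ∨ PySem.Str.split₀ text = []
instance (text : String) (max_len : Int) : Decidable (Pre_break_long_words text max_len) := by
  unfold Pre_break_long_words; infer_instance
def pvWitness_break_long_words : String × Int := ("breaking long words", 4)

-- On a negative max_len with at least one word A returns "" (its chunking range is
-- empty, so every word is silently deleted), while B returns the words joined by
-- single spaces, unbroken — the intended value: a nonsense chunk size should not
-- erase the text.
def D_break_long_words (text : String) (max_len : Int) : Prop :=
  max_len < 0 ∧ PySem.Str.split₀ text ≠ []
instance (text : String) (max_len : Int) : Decidable (D_break_long_words text max_len) := by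
  unfold D_break_long_words; infer_instance

def Spec_break_long_words (text : String) (max_len : Int) (out : String) : Prop :=
  ¬ D_break_long_words text max_len → out = break_long_words_alt text max_len
instance (text : String) (max_len : Int) (out : String) : Decidable (Spec_break_long_words text max_len out) := by
  unfold Spec_break_long_words; infer_instance

def pvDiffWitness_break_long_words : String × Int := ("ab", -1)
def pvDiffWitnessOut_break_long_words : String × String := ("", "ab")

-- ===== CLAIM (what is proved, stated in full; the proofs are below) =====
def Claim_unchanged_break_long_words : Prop := ∀ (text : String) (max_len : Int), Dom_break_long_words text max_len → Pre_break_long_words text max_len → Spec_break_long_words text max_len (break_long_words text max_len)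
def Claim_changed_break_long_words : Prop := Dom_break_long_words (pvDiffWitness_break_long_words.1) (pvDiffWitness_break_long_words.2) ∧ Pre_break_long_words (pvDiffWitness_break_long_words.1) (pvDiffWitness_break_long_words.2) ∧ D_break_long_words (pvDiffWitness_break_long_words.1) (pvDiffWitness_break_long_words.2) ∧ break_long_words (pvDiffWitness_break_long_words.1) (pvDiffWitness_break_long_words.2) = pvDiffWitnessOut_break_long_words.1 ∧ break_long_words_alt (pvDiffWitness_break_long_words.1) (pvDiffWitness_break_long_words.2) = pvDiffWitnessOut_break_long_words.2 ∧ pvDiffWitnessOut_break_long_words.1 ≠ pvDiffWitnessOut_break_long_words.2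
def Claim_exact_break_long_words : Prop := ∀ (text : String) (max_len : Int), Dom_break_long_words text max_len → Pre_break_long_words text max_len → D_break_long_words text max_len → break_long_words text max_len ≠ break_long_words_alt text max_len

-- ===== LEMMAS AND PROOFS =====

-- proof-side vocabulary ------------------------------------------------------

-- the chunk list A computes for one word (char level)
def pvChunksIdx (m : Int) (w : List Char) : List (List Char) :=
  (PySem.List.pyRange 0 (w.length : Int) m).map
    (fun i => PySem.List.slice w (some i) (some (i + m)))

-- rendering of a word list: words chunked, everything joined by single spaces
def pvRender (m : Int) (ws : List (List Char)) : List Char :=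
  PySem.Chars.join [' '] (ws.flatMap (pvChunksIdx m))

-- continuation of the current word, k chars already emitted in the current chunk
def pvCont (m : Int) : List Char → Int → List Char
  | [], _ => []
  | c :: s, k => if k = m then ' ' :: c :: pvCont m s 1 else c :: pvCont m s (k + 1)

-- what B's automaton emits from state (b = "output so far nonempty", count)
def pvSpec (m : Int) : List Char → Bool → Option Int → List Char
  | [], _, _ => []
  | c :: s, b, k? =>
    if PySem.Chars.isspace c then pvSpec m s b none
    else if k? = none ∨ k? = some m then
      (if b then [' '] else []) ++ c :: pvSpec m s true (some 1)
    else c :: pvSpec m s true (k?.map (· + 1))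

-- B's fold = pvSpec ----------------------------------------------------------

theorem pv_foldB_spec (m : Int) (s : List Char) : ∀ (out : List Char) (k? : Option Int),
    (s.foldl (pvStepB m) (out, k?)).1 = out ++ pvSpec m s (!out.isEmpty) k? := by
  induction s with
  | nil => intro out k?; simp [pvSpec]
  | cons c s ih =>
    intro out k?
    simp only [List.foldl_cons]
    by_cases hsp : PySem.Chars.isspace c = true
    · have hstep : pvStepB m (out, k?) c = (out, none) := by simp [pvStepB, hsp]
      rw [hstep, ih]
      simp [pvSpec, hsp]
    · by_cases hk : k? = none ∨ k? = some m
      · by_cases ho : out = []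
        · subst ho
          have hstep : pvStepB m (([] : List Char), k?) c = ([c], some 1) := by
            simp [pvStepB, hsp, hk]
          rw [hstep, ih]
          simp [pvSpec, hsp, hk]
        · have hstep : pvStepB m (out, k?) c = (out ++ [' '] ++ [c], some 1) := by
            simp [pvStepB, hsp, hk, ho]
          rw [hstep, ih]
          have hne : (out ++ [' ', c]).isEmpty = false := by simp
          simp [pvSpec, hsp, hk, ho, hne]
      · have hstep : pvStepB m (out, k?) c = (out ++ [c], k?.map (· + 1)) := by
          simp [pvStepB, hsp, hk]
        rw [hstep, ih]
        have hne : (out ++ [c]).isEmpty = false := by simp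
        by_cases ho : out = [] <;> simp [pvSpec, hsp, hk, ho, hne]

-- split₀ structure -----------------------------------------------------------

theorem pv_go_acc (s : List Char) : ∀ (cur : List Char) (acc : List (List Char)),
    PySem.Chars.split₀.go s cur acc = acc.reverse ++ PySem.Chars.split₀.go s cur [] := by
  induction s with
  | nil =>
    intro cur acc
    simp only [PySem.Chars.split₀.go]
    by_cases h : cur.isEmpty = true <;> simp [h]
  | cons c s ih =>
    intro cur acc
    simp only [PySem.Chars.split₀.go]
    by_cases hsp : PySem.Chars.isspace c = true
    · by_cases hc : cur.isEmpty = true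
      · simp only [hsp, hc, if_pos]
        exact ih [] acc
      · simp only [hsp, if_pos, hc]
        rw [ih [] (cur.reverse :: acc), ih [] [cur.reverse]]
        simp
    · simp only [hsp]
      exact ih (c :: cur) acc

theorem pv_split_space_cons (c : Char) (s : List Char) (h : PySem.Chars.isspace c = true) :
    PySem.Chars.split₀ (c :: s) = PySem.Chars.split₀ s := by
  simp [PySem.Chars.split₀, PySem.Chars.split₀.go, h]

-- mid-word invariant: a nonempty current word is closed off at the next space (or the end)

theorem pv_go_word (s : List Char) : ∀ (cur : List Char) (acc : List (List Char)), cur ≠ [] →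
    PySem.Chars.split₀.go s cur acc =
      PySem.Chars.split₀.go (s.dropWhile (fun d => !PySem.Chars.isspace d)) []
        ((cur.reverse ++ s.takeWhile (fun d => !PySem.Chars.isspace d)) :: acc) := by
  induction s with
  | nil =>
    intro cur acc hcur
    simp only [PySem.Chars.split₀.go, List.dropWhile_nil, List.takeWhile_nil, List.append_nil]
    rw [if_neg (by simpa using hcur)]
    simp
  | cons c s ih =>
    intro cur acc hcur
    by_cases hsp : PySem.Chars.isspace c = true
    · simp only [PySem.Chars.split₀.go, hsp, if_pos, List.dropWhile_cons, List.takeWhile_cons,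
        Bool.not_true]
      rw [if_neg (by simpa using hcur)]
      conv_rhs => rw [PySem.Chars.split₀.go.eq_def]
      simp [hsp]
    · have hsp' : PySem.Chars.isspace c = false := by simpa using hsp
      simp only [PySem.Chars.split₀.go, hsp', List.dropWhile_cons, List.takeWhile_cons,
        Bool.not_eq_eq_eq_not, Bool.not_true]
      rw [ih (c :: cur) acc (by simp)]
      simp

theorem pv_split_word_cons (c : Char) (s : List Char) (h : PySem.Chars.isspace c = false) :
    PySem.Chars.split₀ (c :: s) =
      (c :: s.takeWhile (fun d => !PySem.Chars.isspace d)) ::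
        PySem.Chars.split₀ (s.dropWhile (fun d => !PySem.Chars.isspace d)) := by
  have h1 : PySem.Chars.split₀ (c :: s) = PySem.Chars.split₀.go s [c] [] := by
    simp [PySem.Chars.split₀, PySem.Chars.split₀.go, h]
  rw [h1, pv_go_word s [c] [] (by simp)]
  rw [pv_go_acc]
  rfl

theorem pv_split_eq_nil_iff (s : List Char) :
    PySem.Chars.split₀ s = [] ↔ ∀ c ∈ s, PySem.Chars.isspace c = true := by
  induction s with
  | nil => simp [PySem.Chars.split₀, PySem.Chars.split₀.go]
  | cons c s ih =>
    by_cases hsp : PySem.Chars.isspace c = true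
    · rw [pv_split_space_cons c s hsp, ih]
      simp [hsp]
    · rw [pv_split_word_cons c s (by simpa using hsp)]
      simp [hsp]

theorem pv_go_ne_nil (s : List Char) : ∀ (cur : List Char) (acc : List (List Char)),
    (∀ u ∈ acc, u ≠ []) → ∀ u ∈ PySem.Chars.split₀.go s cur acc, u ≠ [] := by
  induction s with
  | nil =>
    intro cur acc hacc u hu
    simp only [PySem.Chars.split₀.go] at hu
    split at hu
    · exact hacc u (by simpa using hu)
    · rename_i hcur
      have hu' : u ∈ acc ∨ u = cur.reverse := by simpa using hu
      rcases hu' with h | h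
      · exact hacc u h
      · subst h; simpa using fun h' => hcur (by simp [h'])
  | cons c rest ih =>
    intro cur acc hacc u hu
    simp only [PySem.Chars.split₀.go] at hu
    split at hu
    · split at hu
      · exact ih [] acc hacc u hu
      · rename_i hcur
        refine ih [] (cur.reverse :: acc) ?_ u hu
        intro v hv
        rw [List.mem_cons] at hv
        rcases hv with h | h
        · subst h; simpa using fun h' => hcur (by simp [h'])
        · exact hacc v h
    · exact ih (c :: cur) acc hacc u hu

theorem pv_split_word_ne_nil (text : String) (w : String)
    (hw : w ∈ PySem.Str.split₀ text) : w.toList ≠ [] := by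
  have : w.toList ∈ List.map String.toList (PySem.Str.split₀ text) :=
    List.mem_map_of_mem hw
  rw [PySem.Str.split₀_map_toList] at this
  exact pv_go_ne_nil text.toList [] [] (by simp) w.toList this

-- A's chunk list, recursively ------------------------------------------------

theorem pv_join_cons (sep p : List Char) (l : List (List Char)) :
    PySem.Chars.join sep (p :: l) =
      p ++ (if l = [] then [] else sep ++ PySem.Chars.join sep l) := by
  cases l with
  | nil => simp [PySem.Chars.join_singleton]
  | cons q rest => simp [PySem.Chars.join_cons_cons]

theorem pv_slice_shift (m : Int) (hm : 1 ≤ m) (w : List Char) (i : Int) (hi : 0 ≤ i) :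
    PySem.List.slice w (some (i + m)) (some (i + m + m)) =
      PySem.List.slice (w.drop m.toNat) (some i) (some (i + m)) := by
  rw [PySem.List.slice_toNat w (by omega) (by omega),
    PySem.List.slice_toNat (w.drop m.toNat) (by omega) (by omega)]
  rw [List.drop_drop]
  have e1 : m.toNat + i.toNat = (i + m).toNat := by omega
  have e2 : (i + m + m).toNat - (i + m).toNat = (i + m).toNat - i.toNat := by omega
  rw [e1, e2]

theorem pv_chunksIdx_cons (m : Int) (hm : 1 ≤ m) (w : List Char) (hw : w ≠ []) :
    pvChunksIdx m w = w.take m.toNat ::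
      (if (w.length : Int) ≤ m then [] else pvChunksIdx m (w.drop m.toNat)) := by
  have hm0 : (0:Int) < m := by omega
  have hL1 : 1 ≤ w.length := List.length_pos_iff.mpr hw
  set L : Int := (w.length : Int) with hLdef
  have hL1' : (1:Int) ≤ L := by rw [hLdef]; exact_mod_cast hL1
  by_cases hle : L ≤ m
  · -- single chunk
    have hrange : PySem.List.pyRange 0 L m = [0] := by
      rw [PySem.List.pyRange_of_pos 0 L hm0]
      have hcount : ((L - 0 + m - 1) / m).toNat = 1 := by
        have ha : 1 ≤ (L - 0 + m - 1) / m := by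
          rw [Int.le_ediv_iff_mul_le hm0]; omega
        have hb : (L - 0 + m - 1) / m < 2 := by
          rw [Int.ediv_lt_iff_lt_mul hm0]; omega
        omega
      rw [if_pos (by omega), hcount]; simp
    simp only [pvChunksIdx, ← hLdef, hrange, List.map_cons, List.map_nil, if_pos hle]
    rw [PySem.List.slice_toNat w (by omega) (by omega)]
    simp
  · -- first chunk, then the rest shifted by m
    replace hle : m < L := by omega
    have hn : ((L + m - 1) / m).toNat = ((L - m + m - 1) / m).toNat + 1 := by
      have h1 : L + m - 1 = (L - 1) + 1 * m := by ring
      have h2 : (L - 1 + 1 * m) / m = (L - 1) / m + 1 := Int.add_mul_ediv_right _ _ (by omega)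
      have h3 : 0 ≤ (L - 1) / m := Int.ediv_nonneg (by omega) (by omega)
      have h4 : L - m + m - 1 = L - 1 := by ring
      rw [h1, h2, h4]; omega
    have hdroplen : ((w.drop m.toNat).length : Int) = L - m := by
      simp [List.length_drop]; omega
    simp only [pvChunksIdx, ← hLdef, hdroplen, if_neg (by omega : ¬ L ≤ m)]
    rw [PySem.List.pyRange_of_pos 0 L hm0, PySem.List.pyRange_of_pos 0 (L - m) hm0,
      if_pos (by omega : (0:Int) < L), if_pos (by omega : (0:Int) < L - m)]
    rw [show (L - 0 + m - 1) = L + m - 1 by ring, hn,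
      show (L - m - 0 + m - 1) = L - m + m - 1 by ring]
    rw [List.range_succ_eq_map, List.map_cons, List.map_cons, List.map_map, List.map_map]
    congr 1
    · -- head chunk
      rw [show ((0:Int) + m * (0:Nat)) = 0 by simp]
      rw [PySem.List.slice_toNat w (by omega) (by omega)]
      simp
    · -- shifted tail chunks
      rw [List.map_map]
      apply List.map_congr_left
      intro k _
      simp only [Function.comp_apply, Nat.succ_eq_add_one]
      have hk0 : (0:Int) ≤ m * (k : Int) := by positivity
      push_cast
      rw [show (0:Int) + m * ((k:Int) + 1) = m * (k:Int) + m by ring,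
        show m * (k:Int) + m + m = (m * (k:Int) + m) + m by ring,
        show (0:Int) + m * (k:Int) = m * (k:Int) by ring]
      exact pv_slice_shift m hm w (m * (k:Int)) hk0

theorem pv_cont_id (m : Int) (s : List Char) : ∀ k : Int, 1 ≤ k →
    (s.length : Int) ≤ m - k → pvCont m s k = s := by
  induction s with
  | nil => intro k _ _; rfl
  | cons c s ih =>
    intro k hk hlen
    have h0 : (s.length : Int) + 1 ≤ m - k := by
      push_cast [List.length_cons] at hlen; omega
    rw [pvCont, if_neg (by omega)]
    rw [ih (k + 1) (by omega) (by omega)]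

theorem pv_cont_split (m : Int) (s : List Char) : ∀ k : Int, 1 ≤ k → k ≤ m →
    pvCont m s k = s.take (m - k).toNat ++ pvCont m (s.drop (m - k).toNat) m := by
  induction s with
  | nil => intro k _ _; simp [pvCont]
  | cons c s ih =>
    intro k hk hkm
    by_cases hke : k = m
    · subst hke; simp
    · rw [pvCont, if_neg hke, ih (k + 1) (by omega) (by omega)]
      have h1 : (m - k).toNat = (m - (k + 1)).toNat + 1 := by omega
      rw [h1, List.take_succ_cons, List.drop_succ_cons]
      simp

theorem pv_join_chunksIdx (m : Int) (hm : 1 ≤ m) : ∀ (n : Nat) (c : Char) (cs : List Char),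
    (c :: cs).length ≤ n →
    PySem.Chars.join [' '] (pvChunksIdx m (c :: cs)) = c :: pvCont m cs 1 := by
  intro n
  induction n with
  | zero => intro c cs h; simp at h
  | succ n ih =>
    intro c cs hn
    set w : List Char := c :: cs with hw
    rw [pv_chunksIdx_cons m hm w (by simp [hw])]
    by_cases hle : (w.length : Int) ≤ m
    · rw [if_pos hle, pv_join_cons]
      rw [if_pos rfl, List.append_nil]
      rw [List.take_of_length_le (by omega)]
      rw [hw, pv_cont_id m cs 1 (by omega) (by simp [hw, List.length_cons] at hle ⊢; omega)]
    · rw [if_neg hle]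
      replace hle : m < (w.length : Int) := by omega
      have hmN : m.toNat ≥ 1 := by omega
      have hdne : w.drop m.toNat ≠ [] := by
        intro h
        have := congrArg List.length h
        simp [List.length_drop] at this
        omega
      obtain ⟨d, ds, hds⟩ := List.exists_cons_of_ne_nil hdne
      rw [pv_join_cons, if_neg (by
        rw [hds, pv_chunksIdx_cons m hm (d :: ds) (by simp)]; simp)]
      rw [hds, ih d ds (by
        have := congrArg List.length hds
        simp [List.length_drop] at this
        simp [hw] at *
        omega)]
      -- now rebuild the right-hand side
      rw [show cs = w.tail by simp [hw]]
      rw [pv_cont_split m w.tail 1 (by omega) hm]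
      have h2 : w.tail.drop (m - 1).toNat = d :: ds := by
        rw [← hds, hw, List.tail_cons,
          show m.toNat = (m - 1).toNat + 1 by omega, List.drop_succ_cons]
      rw [h2]
      rw [show pvCont m (d :: ds) m = ' ' :: d :: pvCont m ds 1 by simp [pvCont]]
      have h3 : c :: w.tail.take (m - 1).toNat = w.take m.toNat := by
        rw [hw, List.tail_cons, show m.toNat = (m-1).toNat + 1 by omega, List.take_succ_cons]
      rw [← List.cons_append, h3]
      simp

-- render = pvSpec (the heart of the proof) -----------------------------------

theorem pv_flatMap_chunks_ne_nil (m : Int) (hm : 1 ≤ m) (ws : List (List Char))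
    (hne : ws ≠ []) (hw : ∀ w ∈ ws, w ≠ []) :
    ws.flatMap (pvChunksIdx m) ≠ [] := by
  obtain ⟨w, ws', rfl⟩ := List.exists_cons_of_ne_nil hne
  rw [List.flatMap_cons, pv_chunksIdx_cons m hm w (hw w (by simp))]
  simp

theorem pv_join_append (sep : List Char) (l1 l2 : List (List Char))
    (h1 : l1 ≠ []) (h2 : l2 ≠ []) :
    PySem.Chars.join sep (l1 ++ l2) =
      PySem.Chars.join sep l1 ++ sep ++ PySem.Chars.join sep l2 := by
  induction l1 with
  | nil => exact absurd rfl h1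
  | cons p l1 ih =>
    cases l1 with
    | nil =>
      obtain ⟨q, l2', rfl⟩ := List.exists_cons_of_ne_nil h2
      simp [PySem.Chars.join_cons_cons, PySem.Chars.join_singleton]
    | cons p' l1' =>
      rw [show (p :: p' :: l1') ++ l2 = p :: p' :: (l1' ++ l2) from rfl,
        PySem.Chars.join_cons_cons, ← List.cons_append, ih (by simp),
        PySem.Chars.join_cons_cons]
      simp

theorem pv_split_words_ne_nil (s : List Char) :
    ∀ u ∈ PySem.Chars.split₀ s, u ≠ [] :=
  pv_go_ne_nil s [] [] (by simp)

theorem pv_render_cons (m : Int) (hm : 1 ≤ m) (c : Char) (tw : List Char)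
    (ws : List (List Char)) (hw : ∀ w ∈ ws, w ≠ []) :
    pvRender m ((c :: tw) :: ws) =
      (c :: pvCont m tw 1) ++ (if ws = [] then [] else [' ']) ++ pvRender m ws := by
  rw [← pv_join_chunksIdx m hm (c :: tw).length c tw le_rfl]
  unfold pvRender
  rw [List.flatMap_cons]
  by_cases hws : ws = []
  · subst hws
    simp [PySem.Chars.join_nil]
  · rw [if_neg hws]
    rw [pv_join_append [' '] _ _ (by
        rw [pv_chunksIdx_cons m hm (c :: tw) (by simp)]; simp)
      (pv_flatMap_chunks_ne_nil m hm ws hws hw)]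

theorem pv_render_spec (m : Int) (hm : 1 ≤ m) : ∀ (n : Nat) (s : List Char), s.length ≤ n →
    (∀ b : Bool, pvSpec m s b none =
      (if b = true ∧ PySem.Chars.split₀ s ≠ [] then [' '] else []) ++
        pvRender m (PySem.Chars.split₀ s)) ∧
    (∀ k : Int, 1 ≤ k → k ≤ m →
      pvSpec m s true (some k) =
        pvCont m (s.takeWhile (fun d => !PySem.Chars.isspace d)) k ++
          pvSpec m (s.dropWhile (fun d => !PySem.Chars.isspace d)) true none) := by
  intro n
  induction n with
  | zero =>
    intro s hs
    have : s = [] := List.length_eq_zero_iff.mp (by omega)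
    subst this
    constructor
    · intro b
      simp [pvSpec, PySem.Chars.split₀, PySem.Chars.split₀.go, pvRender, PySem.Chars.join_nil]
    · intro k _ _
      simp [pvSpec, pvCont]
  | succ n ih =>
    intro s hs
    cases s with
    | nil =>
      constructor
      · intro b
        simp [pvSpec, PySem.Chars.split₀, PySem.Chars.split₀.go, pvRender, PySem.Chars.join_nil]
      · intro k _ _
        simp [pvSpec, pvCont]
    | cons c s' =>
      have hs' : s'.length ≤ n := by simpa using hs
      by_cases hsp : PySem.Chars.isspace c = true
      · constructor
        · intro b
          rw [show pvSpec m (c :: s') b none = pvSpec m s' b none by simp [pvSpec, hsp]]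
          rw [(ih s' hs').1 b, pv_split_space_cons c s' hsp]
        · intro k hk hkm
          rw [show pvSpec m (c :: s') true (some k) = pvSpec m s' true none by
            simp [pvSpec, hsp]]
          rw [List.takeWhile_cons, List.dropWhile_cons]
          simp only [hsp, Bool.not_true, if_neg, Bool.false_eq_true, not_false_eq_true]
          rw [show pvCont m [] k = [] from rfl]
          rw [show pvSpec m (c :: s') true none = pvSpec m s' true none by
            simp [pvSpec, hsp]]
          simp
      · have hsp' : PySem.Chars.isspace c = false := by simpa using hsp
        have hM2 : ∀ k : Int, 1 ≤ k → k ≤ m →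
            pvSpec m (c :: s') true (some k) =
              pvCont m ((c :: s').takeWhile (fun d => !PySem.Chars.isspace d)) k ++
                pvSpec m ((c :: s').dropWhile (fun d => !PySem.Chars.isspace d)) true none := by
          intro k hk hkm
          rw [List.takeWhile_cons, List.dropWhile_cons]
          simp only [hsp', Bool.not_false, if_pos]
          by_cases hke : k = m
          · rw [show pvSpec m (c :: s') true (some k) =
                ' ' :: c :: pvSpec m s' true (some 1) by simp [pvSpec, hsp', hke]]
            rw [show pvCont m (c :: s'.takeWhile (fun d => !PySem.Chars.isspace d)) k =
                ' ' :: c :: pvCont m (s'.takeWhile (fun d => !PySem.Chars.isspace d)) 1 by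
              simp [pvCont, hke]]
            rw [(ih s' hs').2 1 le_rfl hm]
            simp
          · rw [show pvSpec m (c :: s') true (some k) =
                c :: pvSpec m s' true (some (k + 1)) by
              simp [pvSpec, hsp', hke]]
            rw [show pvCont m (c :: s'.takeWhile (fun d => !PySem.Chars.isspace d)) k =
                c :: pvCont m (s'.takeWhile (fun d => !PySem.Chars.isspace d)) (k + 1) by
              simp [pvCont, hke]]
            rw [(ih s' hs').2 (k + 1) (by omega) (by omega)]
            simp
        refine ⟨?_, hM2⟩
        intro b
        rw [pv_split_word_cons c s' hsp']
        rw [show pvSpec m (c :: s') b none =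
            (if b then [' '] else []) ++ c :: pvSpec m s' true (some 1) by
          simp [pvSpec, hsp']]
        rw [(ih s' hs').2 1 le_rfl hm]
        have hdw : (s'.dropWhile (fun d => !PySem.Chars.isspace d)).length ≤ n :=
          le_trans (List.length_dropWhile_le _ _) hs'
        rw [(ih _ hdw).1 true]
        rw [pv_render_cons m hm c _ _ (pv_split_words_ne_nil _)]
        by_cases hws : PySem.Chars.split₀ (s'.dropWhile (fun d => !PySem.Chars.isspace d)) = []
        · rw [hws]
          simp [pvRender, PySem.Chars.join_nil]
        · rw [if_neg hws]
          cases b <;> simp [hws]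

-- A's value, normalised ------------------------------------------------------

theorem pv_chunks_short (w : String) (m : Int) (hw : w.toList ≠ [])
    (hle : ¬ PySem.Str.len w > m) :
    (PySem.List.pyRange 0 (PySem.Str.len w) m).map
      (fun i => PySem.Str.slice w (some i) (some (i + m))) = [w] := by
  have hL1 : (1:Int) ≤ PySem.Str.len w := by
    have : 0 < w.toList.length := List.length_pos_iff.mpr hw
    simp only [PySem.Str.len]; exact_mod_cast this
  have hLm : PySem.Str.len w ≤ m := by omega
  have hm : (0:Int) < m := by omega
  have hrange : PySem.List.pyRange 0 (PySem.Str.len w) m = [0] := by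
    rw [PySem.List.pyRange_of_pos 0 (PySem.Str.len w) hm]
    have hcount : ((PySem.Str.len w - 0 + m - 1) / m).toNat = 1 := by
      have ha : 1 ≤ (PySem.Str.len w - 0 + m - 1) / m := by
        rw [Int.le_ediv_iff_mul_le hm]; omega
      have hb : (PySem.Str.len w - 0 + m - 1) / m < 2 := by
        rw [Int.ediv_lt_iff_lt_mul hm]; omega
      omega
    rw [if_pos (by omega), hcount]
    simp
  rw [hrange]
  simp only [List.map_cons, List.map_nil, zero_add]
  have hslice : PySem.Str.slice w (some 0) (some m) = w := by
    simp only [PySem.Str.slice, PySem.Chars.slice_eq_listSlice,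
      PySem.List.slice_zero_start, PySem.List.slice_to w.toList (le_of_lt hm)]
    rw [List.take_of_length_le (by
      have : (w.toList.length : Int) ≤ m := by simpa [PySem.Str.len] using hLm
      omega)]
    simp
  rw [hslice]

-- A = " ".join of the flat chunk lists, for every max_len ≠ 0
theorem pv_A_norm (text : String) (m : Int) (_hm : m ≠ 0) :
    break_long_words text m = PySem.Str.join " "
      ((PySem.Str.split₀ text).flatMap (fun w =>
        (PySem.List.pyRange 0 (PySem.Str.len w) m).map
          (fun i => PySem.Str.slice w (some i) (some (i + m))))) := by
  simp only [break_long_words]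
  by_cases htext : text = ""
  · subst htext
    rfl
  · rw [if_neg htext]
    have hbody : ∀ (acc : List String), ∀ w ∈ PySem.Str.split₀ text,
        (if PySem.Str.len w > m then
          (PySem.List.pyRange 0 (PySem.Str.len w) m).foldl
            (fun acc2 i => acc2 ++ [PySem.Str.slice w (some i) (some (i + m))]) acc
        else acc ++ [w])
        = acc ++ (PySem.List.pyRange 0 (PySem.Str.len w) m).map
            (fun i => PySem.Str.slice w (some i) (some (i + m))) := by
      intro acc w hw
      have hinner : (PySem.List.pyRange 0 (PySem.Str.len w) m).foldl
          (fun acc2 i => acc2 ++ [PySem.Str.slice w (some i) (some (i + m))]) acc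
          = acc ++ (PySem.List.pyRange 0 (PySem.Str.len w) m).map
              (fun i => PySem.Str.slice w (some i) (some (i + m))) := by
        rw [PySem.List.foldl_append_eq_flatMap
          (fun i => [PySem.Str.slice w (some i) (some (i + m))])]
        rw [← List.map_eq_flatMap]
      rw [hinner]
      split
      · rfl
      · rename_i h
        rw [pv_chunks_short w m (pv_split_word_ne_nil text w hw) h]
    rw [PySem.List.foldl_congr_mem (PySem.Str.split₀ text) _
      (fun acc w => acc ++ (PySem.List.pyRange 0 (PySem.Str.len w) m).map
        (fun i => PySem.Str.slice w (some i) (some (i + m)))) [] hbody]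
    rw [PySem.List.foldl_append_eq_flatMap]
    simp

-- small helpers --------------------------------------------------------------

theorem pv_A_nil_words (text : String) (m : Int)
    (h : PySem.Str.split₀ text = []) : break_long_words text m = "" := by
  simp only [break_long_words]
  by_cases htext : text = ""
  · simp [htext]
  · rw [if_neg htext, h]
    rfl

theorem pv_spec_allspace (m : Int) (s : List Char)
    (h : ∀ c ∈ s, PySem.Chars.isspace c = true) :
    ∀ b k?, pvSpec m s b k? = [] := by
  induction s with
  | nil => intro b k?; simp [pvSpec]
  | cons c s ih =>
    intro b k?
    have hc := h c (by simp)
    simp only [pvSpec, hc, if_pos]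
    exact ih (fun d hd => h d (by simp [hd])) b none

theorem pv_foldB_pfx (m : Int) (s : List Char) : ∀ (out : List Char) (k? : Option Int),
    ∃ t, (s.foldl (pvStepB m) (out, k?)).1 = out ++ t := by
  induction s with
  | nil => intro out k?; exact ⟨[], by simp⟩
  | cons c s ih =>
    intro out k?
    simp only [List.foldl_cons, pvStepB]
    by_cases hsp : PySem.Chars.isspace c = true
    · simpa [hsp] using ih out none
    · rw [if_neg (by simp [hsp])]
      by_cases hk : k? = none ∨ k? = some m
      · rw [if_pos hk]
        by_cases ho : out = []
        · subst ho
          obtain ⟨t, ht⟩ := ih [c] (some 1)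
          refine ⟨c :: t, ?_⟩
          simpa using ht
        · rw [if_neg ho]
          obtain ⟨t, ht⟩ := ih (out ++ [' '] ++ [c]) ((some (0:Int)).map (· + 1))
          exact ⟨' ' :: c :: t, by simpa using ht⟩
      · rw [if_neg hk]
        obtain ⟨t, ht⟩ := ih (out ++ [c]) (k?.map (· + 1))
        exact ⟨c :: t, by simpa using ht⟩

theorem pv_foldB_ne_nil (m : Int) (s : List Char)
    (h : ∃ c ∈ s, PySem.Chars.isspace c = false) :
    ∀ (out : List Char) (k? : Option Int), (s.foldl (pvStepB m) (out, k?)).1 ≠ [] := by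
  induction s with
  | nil => simp at h
  | cons c s ih =>
    intro out k?
    simp only [List.foldl_cons, pvStepB]
    by_cases hsp : PySem.Chars.isspace c = true
    · rw [if_pos hsp]
      rcases h with ⟨d, hd, hds⟩
      rcases List.mem_cons.mp hd with rfl | hd'
      · rw [hsp] at hds; cases hds
      · exact ih ⟨d, hd', hds⟩ out none
    · rw [if_neg (by simp [hsp])]
      set st' := if k? = none ∨ k? = some m then
          ((if out = [] then out else out ++ [' ']), some (0 : Int)) else (out, k?) with hst
      obtain ⟨t, ht⟩ := pv_foldB_pfx m s (st'.1 ++ [c]) (st'.2.map (· + 1))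
      intro hnil
      rw [ht] at hnil
      simp at hnil

-- ===== VERDICT (by name: the statements are the Claim_ definitions above) =====
theorem pv_split_nil_iff_str (text : String) :
    PySem.Str.split₀ text = [] ↔ PySem.Chars.split₀ text.toList = [] := by
  constructor
  · intro h
    rw [← PySem.Str.split₀_map_toList, h]
    simp
  · intro h
    have := PySem.Str.split₀_map_toList text
    rw [h] at this
    exact List.map_eq_nil_iff.mp this

theorem pv_B_eq_render (text : String) (m : Int) (hm : 1 ≤ m) :
    break_long_words_alt text m =
      String.ofList (pvRender m (PySem.Chars.split₀ text.toList)) := by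
  simp only [break_long_words_alt]
  rw [pv_foldB_spec m text.toList [] none]
  have h1 := (pv_render_spec m hm text.toList.length text.toList le_rfl).1 false
  simp only [Bool.false_eq_true, false_and, if_false, List.nil_append] at h1
  simp only [List.isEmpty_nil, Bool.not_true, List.nil_append]
  rw [h1]

theorem pv_A_eq_render (text : String) (m : Int) (hm : 1 ≤ m) :
    break_long_words text m =
      String.ofList (pvRender m (PySem.Chars.split₀ text.toList)) := by
  rw [pv_A_norm text m (by omega)]
  simp only [PySem.Str.join, pvRender]
  congr 1
  rw [List.map_flatMap, ← PySem.Str.split₀_map_toList, List.flatMap_map]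
  have hfun : ∀ (w : String),
      List.map String.toList
        (List.map (fun i => PySem.Str.slice w (some i) (some (i + m)))
          (PySem.List.pyRange 0 (PySem.Str.len w) m)) = pvChunksIdx m w.toList := by
    intro w
    unfold pvChunksIdx
    rw [List.map_map, PySem.Str.len_eq]
    apply List.map_congr_left
    intro i _
    simp only [Function.comp_apply, PySem.Str.toList_slice, PySem.Chars.slice_eq_listSlice]
  simp only [hfun]
  congr 1

theorem break_long_words_spec : Claim_unchanged_break_long_words := by
  intro text m _ hpre
  unfold Spec_break_long_words
  intro hnd
  unfold D_break_long_words at hnd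
  by_cases hw : PySem.Str.split₀ text = []
  · -- only whitespace: both sides are ""
    rw [pv_A_nil_words text m hw]
    have hall : ∀ c ∈ text.toList, PySem.Chars.isspace c = true :=
      (pv_split_eq_nil_iff text.toList).mp ((pv_split_nil_iff_str text).mp hw)
    simp only [break_long_words_alt]
    rw [pv_foldB_spec m text.toList [] none,
      pv_spec_allspace m text.toList hall _ _]
    rfl
  · -- at least one word: Pre_ gives m ≠ 0, ¬D_ gives 0 ≤ m, so 1 ≤ m
    have hm0 : m ≠ 0 := by
      rcases hpre with h | h
      · exact h
      · exact absurd h hw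
    have hm : 1 ≤ m := by
      rcases not_and_or.mp hnd with h | h
      · omega
      · exact absurd hw (by simpa using h)
    rw [pv_A_eq_render text m hm, pv_B_eq_render text m hm]


theorem break_long_words_changed : Claim_changed_break_long_words := by
  unfold Claim_changed_break_long_words; decide

theorem pv_pyRange_neg (m b : Int) (hm : m < 0) (hb : 0 ≤ b) :
    PySem.List.pyRange 0 b m = [] := by
  simp [PySem.List.pyRange, show ¬ m = 0 by omega, show ¬ (0:Int) < m by omega,
    show ¬ b < 0 by omega]

theorem pv_A_neg (text : String) (m : Int) (hm : m < 0)
    (hne : PySem.Str.split₀ text ≠ []) : break_long_words text m = "" := by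
  simp only [break_long_words]
  have htext : ¬ text = "" := by
    intro h
    subst h
    exact hne (by decide)
  rw [if_neg htext]
  rw [PySem.List.foldl_congr_mem (PySem.Str.split₀ text) _
    (fun (acc : List String) (_ : String) => acc) [] ?_]
  · simp
    decide
  · intro acc w hw
    have hlen : 1 ≤ PySem.Str.len w := by
      rw [PySem.Str.len_eq]
      have := pv_split_word_ne_nil text w hw
      have : 0 < w.toList.length := List.length_pos_iff.mpr this
      omega
    rw [if_pos (by omega), pv_pyRange_neg m (PySem.Str.len w) hm (by omega)]
    rfl

theorem break_long_words_tight : Claim_exact_break_long_words := by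
  intro text m _ _ hd
  rcases hd with ⟨hm, hne⟩
  rw [pv_A_neg text m hm hne]
  intro h
  have hex : ∃ c ∈ text.toList, PySem.Chars.isspace c = false := by
    by_contra hall
    refine hne ((pv_split_nil_iff_str text).mpr ((pv_split_eq_nil_iff text.toList).mpr ?_))
    intro c hc
    by_contra hcs
    exact hall ⟨c, hc, by simpa using hcs⟩
  have hB := pv_foldB_ne_nil m text.toList hex [] none
  apply hB
  have h2 := congrArg String.toList h.symm
  simpa [break_long_words_alt, String.toList_ofList] using h2
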